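-- pv_equiv track=rewrite | github.com/E-Doggo/ProyectoCalidad | utils.py | move_southwest
-- ===== SOURCE A (Python) =====
-- def move_southwest(new_board, row_copy, col_copy, previous_position, player):
--     for n in range(1, min(4 - row_copy, col_copy + 1) + 1):
--         if row_copy + n < 4 and col_copy - n >= 0:
--             if new_board[row_copy + n][col_copy - n] is not None:
--                 break
--             new_board[row_copy + n][col_copy - n] = player
--             new_board[previous_position[0]][previous_position[1]] = None
--             previous_position = [row_copy + n, col_copy - n]
--     return new_board
-- ===== SOURCE B (Python) =====
-- def move_southwest(new_board, row_copy, col_copy, previous_position, player):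
--     # Phase 1: scan the southwest diagonal for the landing square (last
--     # consecutive empty cell); Phase 2: one single paired write.
--     r, c = row_copy + 1, col_copy - 1
--     dest = None
--     while r < 4 and c >= 0 and new_board[r][c] is None:
--         dest = (r, c)
--         r, c = r + 1, c - 1
--     if dest is not None:
--         new_board[dest[0]][dest[1]] = player
--         new_board[previous_position[0]][previous_position[1]] = None
--     return new_board
-- ===== Notes on version B (the rewrite author's own statement) =====
-- stated objective: simpler
-- what changed: A mutates on every diagonal step (write player, clear previous, rebind previous_position); B first scans the diagonal read-only to find the landing square and then performs exactly one paired write, so intermediate cells are never touched.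
import Mathlib
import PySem

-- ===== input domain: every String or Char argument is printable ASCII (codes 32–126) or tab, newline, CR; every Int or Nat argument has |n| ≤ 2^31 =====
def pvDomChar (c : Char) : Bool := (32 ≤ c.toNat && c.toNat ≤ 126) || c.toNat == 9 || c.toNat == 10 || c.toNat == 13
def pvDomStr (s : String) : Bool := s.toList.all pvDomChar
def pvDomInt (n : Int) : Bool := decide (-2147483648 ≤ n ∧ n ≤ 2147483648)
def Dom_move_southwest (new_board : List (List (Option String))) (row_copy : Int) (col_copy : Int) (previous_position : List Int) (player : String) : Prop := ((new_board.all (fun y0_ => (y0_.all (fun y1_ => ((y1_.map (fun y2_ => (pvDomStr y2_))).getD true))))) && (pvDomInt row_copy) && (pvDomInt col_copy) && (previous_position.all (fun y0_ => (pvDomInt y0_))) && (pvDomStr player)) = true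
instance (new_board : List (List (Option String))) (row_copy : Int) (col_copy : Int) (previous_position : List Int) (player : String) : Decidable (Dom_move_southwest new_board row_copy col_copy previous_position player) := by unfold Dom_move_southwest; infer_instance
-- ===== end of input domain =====

-- B replaces A's mutate-at-every-diagonal-step loop by a read-only scan for the landing
-- square followed by ONE paired write (objective: simpler). Both Pythons mutate new_board
-- in place with the same net effect; the equivalence proved here is about the return value.

-- shared cell primitives: board[i][j] read (Python indexing) and board[i][j] = v write
def msGet2 (b : List (List (Option String))) (i j : Int) : Option (Option String) :=
  (PySem.List.pyGet? b i).bind (fun row => PySem.List.pyGet? row j)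
def msSet2 (b : List (List (Option String))) (i j : Int) (v : Option String) : List (List (Option String)) :=
  PySem.List.pySetD b i (PySem.List.pySetD (PySem.List.pyGetD b i []) j v)

-- ===== PORT A =====
-- loop body of A; state = (board, previous_position, broke-out-of-loop)
def msStepA (row_copy col_copy : Int) (player : String)
    (st : List (List (Option String)) × List Int × Bool) (n : Int) :
    List (List (Option String)) × List Int × Bool :=
  if st.2.2 then st
  else if row_copy + n < 4 ∧ 0 ≤ col_copy - n then
    if msGet2 st.1 (row_copy + n) (col_copy - n) = some none then
      let b1 := msSet2 st.1 (row_copy + n) (col_copy - n) (some player)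
      let b2 := msSet2 b1 (PySem.List.pyGetD st.2.1 0 0) (PySem.List.pyGetD st.2.1 1 0) none
      (b2, [row_copy + n, col_copy - n], false)
    else (st.1, st.2.1, true)   -- occupied cell: break (IndexError lands here too, outside Pre_)
  else st

def move_southwest (new_board : List (List (Option String))) (row_copy : Int) (col_copy : Int) (previous_position : List Int) (player : String) : List (List (Option String)) :=
  (List.foldl (msStepA row_copy col_copy player) (new_board, previous_position, false)
    (PySem.List.pyRange 1 (min (4 - row_copy) (col_copy + 1) + 1) 1)).1

-- ===== PORT B =====
-- B's while loop: walk the diagonal while in bounds and empty, remembering the last empty cell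
def msScanB (b : List (List (Option String))) (r c : Int) (dest : Option (Int × Int)) : Option (Int × Int) :=
  if h : r < 4 ∧ 0 ≤ c ∧ msGet2 b r c = some none then
    msScanB b (r + 1) (c - 1) (some (r, c))
  else dest
termination_by (4 - r).toNat
decreasing_by omega

def move_southwest_alt (new_board : List (List (Option String))) (row_copy : Int) (col_copy : Int) (previous_position : List Int) (player : String) : List (List (Option String)) :=
  match msScanB new_board (row_copy + 1) (col_copy - 1) none with
  | none => new_board
  | some (dr, dc) =>
      msSet2 (msSet2 new_board dr dc (some player))
        (PySem.List.pyGetD previous_position 0 0) (PySem.List.pyGetD previous_position 1 0) none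

-- ===== PRECONDITION & SPEC =====
-- Pre_ admits every input on which the loop is vacuous (row_copy ≥ 3 or col_copy ≤ 0: A touches
-- nothing) and otherwise restricts the moving case to the game's well-formed inputs: a 4×4 board,
-- 0 ≤ row_copy ≤ 2, 1 ≤ col_copy ≤ 4, a two-element in-range previous_position that does not lie
-- strictly ahead on the scanned southwest diagonal. Outside this A raises (IndexError), returns via
-- Python's accidental negative-index wraparound on malformed boards, returns despite a malformed
-- previous_position it happens never to touch, or — when previous_position lies ahead on the
-- diagonal — clears that square mid-scan and walks through it, an accident no caller (which passes
-- the piece's own square) reaches; B does the natural thing there.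
def Pre_move_southwest (new_board : List (List (Option String))) (row_copy : Int) (col_copy : Int) (previous_position : List Int) (player : String) : Prop :=
  (3 ≤ row_copy ∨ col_copy ≤ 0) ∨
  (0 ≤ row_copy ∧ row_copy ≤ 2 ∧ 1 ≤ col_copy ∧ col_copy ≤ 4 ∧
   new_board.length = 4 ∧ (∀ row ∈ new_board, row.length = 4) ∧
   previous_position.length = 2 ∧
   0 ≤ previous_position.getD 0 0 ∧ previous_position.getD 0 0 ≤ 3 ∧
   0 ≤ previous_position.getD 1 0 ∧ previous_position.getD 1 0 ≤ 3 ∧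
   ¬(previous_position.getD 0 0 + previous_position.getD 1 0 = row_copy + col_copy ∧
     row_copy < previous_position.getD 0 0))
instance (new_board : List (List (Option String))) (row_copy : Int) (col_copy : Int) (previous_position : List Int) (player : String) : Decidable (Pre_move_southwest new_board row_copy col_copy previous_position player) := by unfold Pre_move_southwest; infer_instance

def pvWitness_move_southwest : List (List (Option String)) × Int × Int × List Int × String :=
  ([[none, some "x", none, none], [none, none, none, none], [none, none, none, none], [none, none, none, none]], 0, 1, [0, 1], "x")

def Spec_move_southwest (new_board : List (List (Option String))) (row_copy : Int) (col_copy : Int) (previous_position : List Int) (player : String) (out : List (List (Option String))) : Prop := out = move_southwest_alt new_board row_copy col_copy previous_position player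
instance (new_board : List (List (Option String))) (row_copy : Int) (col_copy : Int) (previous_position : List Int) (player : String) (out : List (List (Option String))) : Decidable (Spec_move_southwest new_board row_copy col_copy previous_position player out) := by unfold Spec_move_southwest; infer_instance

-- ===== CLAIM (what is proved, stated in full; the proofs are below) =====
def Claim_equal_move_southwest : Prop := ∀ (new_board : List (List (Option String))) (row_copy : Int) (col_copy : Int) (previous_position : List Int) (player : String), Dom_move_southwest new_board row_copy col_copy previous_position player → Pre_move_southwest new_board row_copy col_copy previous_position player → Spec_move_southwest new_board row_copy col_copy previous_position player (move_southwest new_board row_copy col_copy previous_position player)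

-- ===== LEMMAS AND PROOFS =====

-- a well-formed 4×4 board
def InB (b : List (List (Option String))) : Prop := b.length = 4 ∧ ∀ row ∈ b, row.length = 4

-- Nat-index versions of the cell primitives, for the algebraic lemmas
def nget (b : List (List (Option String))) (i j : Nat) : Option (Option String) :=
  b[i]?.bind (fun row => row[j]?)
def nset (b : List (List (Option String))) (i j : Nat) (v : Option String) : List (List (Option String)) :=
  b.set i ((b.getD i []).set j v)

theorem get2_nonneg (b : List (List (Option String))) (i j : Int) (hi : 0 ≤ i) (hj : 0 ≤ j) :
    msGet2 b i j = nget b i.toNat j.toNat := by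
  simp [msGet2, nget, PySem.List.pyGet?_of_nonneg, hi, hj]

theorem set2_nonneg (b : List (List (Option String))) (i j : Int) (v : Option String) (hi : 0 ≤ i) (hj : 0 ≤ j) :
    msSet2 b i j v = nset b i.toNat j.toNat v := by
  simp [msSet2, nset, PySem.List.pySetD_of_nonneg, PySem.List.pyGetD_of_nonneg, hi, hj]

theorem row_len (b : List (List (Option String))) (hb : InB b) (i : Nat) (hi : i < b.length) :
    (b[i]'hi).length = 4 :=
  hb.2 _ (List.getElem_mem _)

theorem nget_some (b : List (List (Option String))) (i j : Nat) (h1 : i < b.length)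
    (h2 : j < (b[i]'h1).length) : nget b i j = some ((b[i]'h1)[j]'h2) := by
  rw [nget, List.getElem?_eq_getElem h1]
  simp [List.getElem?_eq_getElem h2]

theorem nget_nset_ne (b : List (List (Option String))) (hb : InB b) (i j p q : Nat) (v : Option String)
    (hi : i < 4) (hj : j < 4) (hp : p < 4) (hq : q < 4) (hne : ¬(p = i ∧ q = j)) :
    nget (nset b p q v) i j = nget b i j := by
  obtain ⟨hL, hR⟩ := hb
  have h1 : i < b.length := by omega
  have hpl : p < b.length := by omega
  by_cases hpi : p = i
  · subst hpi
    have hqj : q ≠ j := fun h => hne ⟨rfl, h⟩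
    simp only [nget, nset]
    rw [List.getElem?_set_self h1, Option.bind_some, List.getElem?_eq_getElem h1,
        Option.bind_some, List.getD_eq_getElem b [] h1, List.getElem?_set_ne hqj]
  · simp only [nget, nset]
    rw [List.getElem?_set_ne hpi]

theorem nset_nset_same (b : List (List (Option String))) (hb : InB b) (i j : Nat) (v w : Option String)
    (hi : i < 4) : nset (nset b i j v) i j w = nset b i j w := by
  obtain ⟨hL, hR⟩ := hb
  have h1 : i < b.length := by omega
  simp only [nset]
  rw [List.getD_eq_getElem (b.set i ((b.getD i []).set j v)) [] (by simpa using h1),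
      List.getElem_set_self, List.getD_eq_getElem b [] h1, List.set_set, List.set_set]

theorem nset_comm (b : List (List (Option String))) (hb : InB b) (i j p q : Nat) (v w : Option String)
    (hi : i < 4) (hp : p < 4) (hne : ¬(p = i ∧ q = j)) :
    nset (nset b i j v) p q w = nset (nset b p q w) i j v := by
  obtain ⟨hL, hR⟩ := hb
  have h1 : i < b.length := by omega
  have hpl : p < b.length := by omega
  by_cases hpi : p = i
  · subst hpi
    have hqj : q ≠ j := fun h => hne ⟨rfl, h⟩
    simp only [nset]
    rw [List.getD_eq_getElem (b.set p ((b.getD p []).set j v)) [] (by simpa using h1),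
        List.getElem_set_self,
        List.getD_eq_getElem (b.set p ((b.getD p []).set q w)) [] (by simpa using h1),
        List.getElem_set_self,
        List.getD_eq_getElem b [] h1, List.set_set, List.set_set,
        List.set_comm _ _ (fun h => hqj h.symm)]
  · simp only [nset]
    rw [List.getD_eq_getElem (b.set i ((b.getD i []).set j v)) [] (by simpa using hpl),
        List.getElem_set_ne (fun h => hpi h.symm),
        List.getD_eq_getElem (b.set p ((b.getD p []).set q w)) [] (by simpa using h1),
        List.getElem_set_ne hpi,
        List.set_comm _ _ (fun h : i = p => hpi h.symm)]
    simp only [List.getD_eq_getElem?_getD, List.getElem?_eq_getElem h1,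
      List.getElem?_eq_getElem hpl, Option.getD_some]

theorem nset_noop (b : List (List (Option String))) (hb : InB b) (i j : Nat) (v : Option String)
    (hi : i < 4) (hj : j < 4) (h : nget b i j = some v) : nset b i j v = b := by
  obtain ⟨hL, hR⟩ := hb
  have h1 : i < b.length := by omega
  have h2 : j < (b[i]'h1).length := by have := row_len b ⟨hL, hR⟩ i h1; omega
  rw [nget_some b i j h1 h2] at h
  have hv : (b[i]'h1)[j]'h2 = v := by injection h
  rw [nset, List.getD_eq_getElem b [] h1, ← hv, List.set_getElem_self, List.set_getElem_self]

theorem InB_nset (b : List (List (Option String))) (hb : InB b) (i j : Nat) (v : Option String)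
    (hi : i < 4) : InB (nset b i j v) := by
  obtain ⟨hL, hR⟩ := hb
  have h1 : i < b.length := by omega
  refine ⟨by simp [nset, hL], ?_⟩
  intro row hrow
  rcases List.mem_or_eq_of_mem_set hrow with h | h
  · exact hR _ h
  · subst h
    rw [List.length_set, List.getD_eq_getElem b [] h1]
    exact row_len b ⟨hL, hR⟩ i h1

-- folding A's step with the break flag set leaves the state unchanged
theorem foldl_broken (r c : Int) (pl : String) (b : List (List (Option String))) (prev : List Int)
    (l : List Int) : List.foldl (msStepA r c pl) (b, prev, true) l = (b, prev, true) := by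
  induction l with
  | nil => rfl
  | cons x xs ih => rw [List.foldl_cons, msStepA]; simpa using ih

-- one unfolding of B's while loop
theorem scanB_unfold (b : List (List (Option String))) (s t : Int) (d : Option (Int × Int)) :
    msScanB b s t d = if s < 4 ∧ 0 ≤ t ∧ msGet2 b s t = some none then
      msScanB b (s + 1) (t - 1) (some (s, t)) else d := by
  rw [msScanB]
  split_ifs with h
  · rfl
  · rfl

-- msScanB with an arbitrary dest, via its value at dest = none
theorem scanB_dest (b : List (List (Option String))) :
    ∀ (fuel : Nat) (s t : Int) (d : Option (Int × Int)), (4 - s).toNat ≤ fuel →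
    msScanB b s t d = match msScanB b s t none with
                      | none => d
                      | some e => some e := by
  intro fuel
  induction fuel with
  | zero =>
    intro s t d hf
    have hng : ¬(s < 4 ∧ 0 ≤ t ∧ msGet2 b s t = some none) := by
      intro h; omega
    rw [scanB_unfold, if_neg hng, scanB_unfold, if_neg hng]
  | succ k ih =>
    intro s t d hf
    by_cases h : s < 4 ∧ 0 ≤ t ∧ msGet2 b s t = some none
    · rw [scanB_unfold, if_pos h, scanB_unfold b s t none, if_pos h,
          ih (s+1) (t-1) (some (s, t)) (by omega)]
      rcases hsc : msScanB b (s+1) (t-1) none with _ | e <;> simp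
    · rw [scanB_unfold, if_neg h, scanB_unfold b s t none, if_neg h]

-- boards that agree on the remaining diagonal scan identically
theorem scanB_congr (b b' : List (List (Option String))) :
    ∀ (fuel : Nat) (s t : Int) (d : Option (Int × Int)), (4 - s).toNat ≤ fuel →
    (∀ k : Int, 0 ≤ k → s + k < 4 → 0 ≤ t - k → msGet2 b' (s + k) (t - k) = msGet2 b (s + k) (t - k)) →
    msScanB b' s t d = msScanB b s t d := by
  intro fuel
  induction fuel with
  | zero =>
    intro s t d hf hag
    have h4 : ¬ s < 4 := by omega
    rw [scanB_unfold, if_neg (by tauto), scanB_unfold, if_neg (by tauto)]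
  | succ k ih =>
    intro s t d hf hag
    by_cases hs : s < 4 ∧ 0 ≤ t
    · have h0 : msGet2 b' s t = msGet2 b s t := by
        have := hag 0 le_rfl (by omega) (by omega)
        simpa using this
      by_cases h : s < 4 ∧ 0 ≤ t ∧ msGet2 b s t = some none
      · rw [scanB_unfold, if_pos (by rw [h0]; exact h), scanB_unfold b s t d, if_pos h]
        exact ih (s+1) (t-1) (some (s, t)) (by omega)
          (fun k hk h4 ht => by
            have := hag (k+1) (by omega) (by omega) (by omega)
            have e1 : s + 1 + k = s + (k + 1) := by ring
            have e2 : t - 1 - k = t - (k + 1) := by ring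
            rw [e1, e2]; exact this)
      · rw [scanB_unfold, if_neg (by rw [h0]; exact h), scanB_unfold b s t d, if_neg h]
    · rw [scanB_unfold, if_neg (by tauto), scanB_unfold b s t d, if_neg (by tauto)]

-- a successful scan lands on the diagonal, in bounds
theorem scanB_mem (b : List (List (Option String))) :
    ∀ (fuel : Nat) (s t dr dc : Int), (4 - s).toNat ≤ fuel →
    msScanB b s t none = some (dr, dc) →
    ∃ k : Int, 0 ≤ k ∧ dr = s + k ∧ dc = t - k ∧ dr < 4 ∧ 0 ≤ dc := by
  intro fuel
  induction fuel with
  | zero =>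
    intro s t dr dc hf hsc
    rw [scanB_unfold, if_neg (by intro h; omega)] at hsc
    exact absurd hsc (by simp)
  | succ k ih =>
    intro s t dr dc hf hsc
    by_cases h : s < 4 ∧ 0 ≤ t ∧ msGet2 b s t = some none
    · rw [scanB_unfold, if_pos h,
          scanB_dest b k (s+1) (t-1) (some (s, t)) (by omega)] at hsc
      rcases h2 : msScanB b (s+1) (t-1) none with _ | ⟨er, ec⟩
      · rw [h2] at hsc
        simp at hsc
        exact ⟨0, le_rfl, by omega, by omega, by omega, by omega⟩
      · rw [h2] at hsc
        simp at hsc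
        obtain ⟨hdr, hdc⟩ := hsc
        obtain ⟨k', hk0, h1', h2', h3', h4'⟩ := ih (s+1) (t-1) er ec (by omega) h2
        exact ⟨k' + 1, by omega, by omega, by omega, by omega, by omega⟩
    · rw [scanB_unfold, if_neg h] at hsc
      exact absurd hsc (by simp)

-- Int-level wrappers around the Nat-index lemmas
theorem get2_total (b : List (List (Option String))) (hb : InB b) (i j : Int)
    (hi0 : 0 ≤ i) (hi4 : i < 4) (hj0 : 0 ≤ j) (hj4 : j < 4) :
    ∃ x, msGet2 b i j = some x := by
  obtain ⟨hL, hR⟩ := hb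
  have h1 : i.toNat < b.length := by omega
  have h2 : j.toNat < (b[i.toNat]'h1).length := by
    have := row_len b ⟨hL, hR⟩ i.toNat h1; omega
  exact ⟨_, by rw [get2_nonneg b i j hi0 hj0, nget_some b i.toNat j.toNat h1 h2]⟩

theorem get2_set2_ne (b : List (List (Option String))) (hb : InB b) (i j p q : Int) (v : Option String)
    (hi0 : 0 ≤ i) (hi4 : i < 4) (hj0 : 0 ≤ j) (hj4 : j < 4)
    (hp0 : 0 ≤ p) (hp4 : p < 4) (hq0 : 0 ≤ q) (hq4 : q < 4)
    (hne : ¬(p = i ∧ q = j)) :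
    msGet2 (msSet2 b p q v) i j = msGet2 b i j := by
  rw [set2_nonneg b p q v hp0 hq0, get2_nonneg _ i j hi0 hj0, get2_nonneg b i j hi0 hj0]
  exact nget_nset_ne b hb i.toNat j.toNat p.toNat q.toNat v (by omega) (by omega) (by omega) (by omega)
    (by intro ⟨h1, h2⟩; exact hne ⟨by omega, by omega⟩)

theorem set2_comm (b : List (List (Option String))) (hb : InB b) (i j p q : Int) (v w : Option String)
    (hi0 : 0 ≤ i) (hi4 : i < 4) (hj0 : 0 ≤ j) (hp0 : 0 ≤ p) (hp4 : p < 4) (hq0 : 0 ≤ q)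
    (hne : ¬(p = i ∧ q = j)) :
    msSet2 (msSet2 b i j v) p q w = msSet2 (msSet2 b p q w) i j v := by
  rw [set2_nonneg b i j v hi0 hj0, set2_nonneg _ p q w hp0 hq0,
      set2_nonneg b p q w hp0 hq0, set2_nonneg _ i j v hi0 hj0]
  exact nset_comm b hb i.toNat j.toNat p.toNat q.toNat v w (by omega) (by omega)
    (by intro ⟨h1, h2⟩; exact hne ⟨by omega, by omega⟩)

theorem set2_set2_same (b : List (List (Option String))) (hb : InB b) (i j : Int) (v w : Option String)
    (hi0 : 0 ≤ i) (hi4 : i < 4) (hj0 : 0 ≤ j) :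
    msSet2 (msSet2 b i j v) i j w = msSet2 b i j w := by
  rw [set2_nonneg b i j v hi0 hj0, set2_nonneg _ i j w hi0 hj0, set2_nonneg b i j w hi0 hj0]
  exact nset_nset_same b hb i.toNat j.toNat v w (by omega)

theorem set2_noop (b : List (List (Option String))) (hb : InB b) (i j : Int) (v : Option String)
    (hi0 : 0 ≤ i) (hi4 : i < 4) (hj0 : 0 ≤ j) (hj4 : j < 4)
    (h : msGet2 b i j = some v) : msSet2 b i j v = b := by
  rw [set2_nonneg b i j v hi0 hj0]
  rw [get2_nonneg b i j hi0 hj0] at h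
  exact nset_noop b hb i.toNat j.toNat v (by omega) (by omega) h

theorem InB_set2 (b : List (List (Option String))) (hb : InB b) (i j : Int) (v : Option String)
    (hi0 : 0 ≤ i) (hi4 : i < 4) (hj0 : 0 ≤ j) : InB (msSet2 b i j v) := by
  rw [set2_nonneg b i j v hi0 hj0]
  exact InB_nset b hb i.toNat j.toNat v (by omega)

-- the heart of the proof: A's loop from step n equals scan-then-single-write from step n
theorem loop_eq (r c : Int) (pl : String) (hr0 : 0 ≤ r) (hr2 : r ≤ 2) (hc1 : 1 ≤ c) (hc4 : c ≤ 4) :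
    ∀ (fuel : Nat) (n : Int) (b : List (List (Option String))) (q0 q1 : Int),
    (min (4 - r) (c + 1) + 1 - n).toNat ≤ fuel →
    1 ≤ n → n ≤ min (4 - r) (c + 1) → InB b →
    0 ≤ q0 → q0 ≤ 3 → 0 ≤ q1 → q1 ≤ 3 →
    ¬(q0 + q1 = r + c ∧ r + n ≤ q0) →
    (List.foldl (msStepA r c pl) (b, [q0, q1], false)
      (PySem.List.pyRange n (min (4 - r) (c + 1) + 1) 1)).1
    = match msScanB b (r + n) (c - n) none with
      | none => b
      | some (dr, dc) => msSet2 (msSet2 b dr dc (some pl)) q0 q1 none := by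
  have hm1 : min (4 - r) (c + 1) ≤ 4 - r := min_le_left _ _
  have hm2 : min (4 - r) (c + 1) ≤ c + 1 := min_le_right _ _
  have hm3 : min (4 - r) (c + 1) = 4 - r ∨ min (4 - r) (c + 1) = c + 1 := min_choice _ _
  intro fuel
  induction fuel with
  | zero => intro n b q0 q1 hf h1n hnm; omega
  | succ f ih =>
    intro n b q0 q1 hf h1n hnm hb hq00 hq03 hq10 hq13 hdiag
    by_cases hlast : n = min (4 - r) (c + 1)
    · -- final iteration: the bounds guard is false on both sides
      have hga : ¬(r + n < 4 ∧ 0 ≤ c - n) := by omega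
      have hgb : ¬(r + n < 4 ∧ 0 ≤ c - n ∧ msGet2 b (r + n) (c - n) = some none) :=
        fun ⟨x1, x2, _⟩ => hga ⟨x1, x2⟩
      rw [PySem.List.pyRange_one_cons (by omega), PySem.List.pyRange_one_eq_nil (by omega),
          List.foldl_cons, List.foldl_nil, scanB_unfold, if_neg hgb]
      simp [msStepA, show ¬(r + n < 4 ∧ n ≤ c) by omega]
    · -- a real iteration: the guard holds; read the cell
      have hg1 : r + n < 4 := by omega
      have hg2 : 0 ≤ c - n := by omega
      obtain ⟨x, hx⟩ := get2_total b hb (r + n) (c - n) (by omega) hg1 hg2 (by omega)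
      rw [PySem.List.pyRange_one_cons (by omega), List.foldl_cons]
      rcases x with _ | s
      · -- empty cell: A writes and moves its marker; B's scan steps forward
        have hstep : msStepA r c pl (b, [q0, q1], false) n =
            (msSet2 (msSet2 b (r + n) (c - n) (some pl)) q0 q1 none, [r + n, c - n], false) := by
          simp [msStepA, hg1, show n ≤ c by omega, hx, PySem.List.pyGetD_of_nonneg]
        rw [hstep]
        have hb' : InB (msSet2 (msSet2 b (r + n) (c - n) (some pl)) q0 q1 none) :=
          InB_set2 _ (InB_set2 b hb _ _ _ (by omega) hg1 hg2) _ _ _ hq00 (by omega) hq10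
        have hagree : ∀ k : Int, 0 ≤ k → (r + n + 1) + k < 4 → 0 ≤ (c - n - 1) - k →
            msGet2 (msSet2 (msSet2 b (r + n) (c - n) (some pl)) q0 q1 none) ((r + n + 1) + k) ((c - n - 1) - k)
              = msGet2 b ((r + n + 1) + k) ((c - n - 1) - k) := by
          intro k hk h4 hc0
          rw [get2_set2_ne _ (InB_set2 b hb _ _ _ (by omega) hg1 hg2) _ _ _ _ _
                (by omega) (by omega) hc0 (by omega) hq00 (by omega) hq10 (by omega)
                (fun ⟨e1, e2⟩ => hdiag ⟨by omega, by omega⟩)]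
          rw [get2_set2_ne b hb _ _ _ _ _ (by omega) (by omega) hc0 (by omega)
                (by omega) hg1 hg2 (by omega) (fun ⟨e1, e2⟩ => by omega)]
        rw [ih (n + 1) (msSet2 (msSet2 b (r + n) (c - n) (some pl)) q0 q1 none) (r + n) (c - n)
              (by omega) (by omega) (by omega) hb' (by omega) (by omega) hg2 (by omega)
              (fun ⟨e1, e2⟩ => by omega)]
        rw [show r + (n + 1) = r + n + 1 by ring, show c - (n + 1) = c - n - 1 by ring]
        rw [scanB_congr b _ 4 (r + n + 1) (c - n - 1) none (by omega) hagree]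
        rw [scanB_unfold b (r + n) (c - n) none, if_pos ⟨hg1, hg2, hx⟩,
            scanB_dest b 4 (r + n + 1) (c - n - 1) (some (r + n, c - n)) (by omega)]
        rcases hV : msScanB b (r + n + 1) (c - n - 1) none with _ | ⟨dr, dc⟩
        · rfl
        · dsimp only
          obtain ⟨k, hk0, hdr, hdc, hdr4, hdc0⟩ :=
            scanB_mem b 4 (r + n + 1) (c - n - 1) dr dc (by omega) hV
          have hqcn : ¬(q0 = r + n ∧ q1 = c - n) :=
            fun ⟨e1, e2⟩ => hdiag ⟨by omega, by omega⟩
          have hdq : ¬(dr = q0 ∧ dc = q1) :=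
            fun ⟨e1, e2⟩ => hdiag ⟨by omega, by omega⟩
          have hcnd : ¬(r + n = dr ∧ c - n = dc) := fun ⟨e1, e2⟩ => by omega
          have hBq : InB (msSet2 b q0 q1 none) := InB_set2 b hb q0 q1 none hq00 (by omega) hq10
          -- push the old-position clear innermost, cancel the intermediate write, pull it out
          rw [set2_comm b hb (r + n) (c - n) q0 q1 (some pl) none (by omega) hg1 hg2
                hq00 (by omega) hq10 hqcn]
          rw [set2_comm (msSet2 (msSet2 b q0 q1 none) (r + n) (c - n) (some pl))
                (InB_set2 _ hBq _ _ _ (by omega) hg1 hg2) dr dc (r + n) (c - n)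
                (some pl) none (by omega) hdr4 hdc0 (by omega) hg1 hg2 hcnd]
          rw [set2_set2_same (msSet2 b q0 q1 none) hBq (r + n) (c - n) (some pl) none
                (by omega) hg1 hg2]
          rw [set2_noop (msSet2 b q0 q1 none) hBq (r + n) (c - n) none (by omega) hg1 hg2 (by omega)
                (by rw [get2_set2_ne b hb (r + n) (c - n) q0 q1 none (by omega) hg1 hg2 (by omega)
                          hq00 (by omega) hq10 (by omega) hqcn]; exact hx)]
          rw [set2_comm b hb q0 q1 dr dc none (some pl) hq00 (by omega) hq10 (by omega)
                hdr4 hdc0 hdq]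
      · -- occupied cell: A breaks, B's scan stops immediately
        have hstep : msStepA r c pl (b, [q0, q1], false) n = (b, [q0, q1], true) := by
          simp [msStepA, hg1, show n ≤ c by omega, hx]
        rw [hstep, foldl_broken, scanB_unfold,
            if_neg (fun ⟨_, _, h⟩ => by rw [hx] at h; simp at h)]

theorem list_len2 {α : Type} (l : List α) (h : l.length = 2) : ∃ a b, l = [a, b] := by
  match l, h with
  | [a, b], _ => exact ⟨a, b, rfl⟩

-- ===== VERDICT (by name: the statement is the Claim_ definition above) =====
theorem move_southwest_spec : Claim_equal_move_southwest := by
  intro nb r c prev pl _ hpre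
  unfold Spec_move_southwest
  rcases hpre with hE | ⟨hr0, hr2, hc1, hc4, hlen, hrows, hplen, hp00, hp03, hp10, hp13, hdiag⟩
  · -- vacuous case: the loop guard never holds and the scan stops at once
    have hg : ¬(r + 1 < 4 ∧ 0 ≤ c - 1) := by rcases hE with h | h <;> omega
    have hscan : msScanB nb (r + 1) (c - 1) none = none := by
      rw [scanB_unfold, if_neg (fun ⟨x1, x2, _⟩ => hg ⟨x1, x2⟩)]
    unfold move_southwest move_southwest_alt
    rw [hscan]
    have hm : min (4 - r) (c + 1) ≤ 1 := by
      rcases hE with h | h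
      · exact le_trans (min_le_left _ _) (by omega)
      · exact le_trans (min_le_right _ _) (by omega)
    by_cases h1 : min (4 - r) (c + 1) + 1 ≤ 1
    · rw [PySem.List.pyRange_one_eq_nil h1]; rfl
    · rw [PySem.List.pyRange_one_cons (by omega), PySem.List.pyRange_one_eq_nil (by omega),
          List.foldl_cons, List.foldl_nil]
      simp [msStepA, show ¬(r + 1 < 4 ∧ 1 ≤ c) by omega]
  · -- moving case: the loop-invariant lemma at n = 1
    obtain ⟨p0, p1, rfl⟩ := list_len2 prev hplen
    have hp00' : 0 ≤ p0 := hp00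
    have hp03' : p0 ≤ 3 := hp03
    have hp10' : 0 ≤ p1 := hp10
    have hp13' : p1 ≤ 3 := hp13
    have hdiag' : ¬(p0 + p1 = r + c ∧ r < p0) := hdiag
    have hm1 : min (4 - r) (c + 1) ≤ 4 - r := min_le_left _ _
    have hmin1 : 1 ≤ min (4 - r) (c + 1) := le_min (by omega) (by omega)
    have hPrev0 : PySem.List.pyGetD [p0, p1] 0 0 = p0 := by
      simp [PySem.List.pyGetD_of_nonneg]
    have hPrev1 : PySem.List.pyGetD [p0, p1] 1 0 = p1 := by
      simp [PySem.List.pyGetD_of_nonneg]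
    unfold move_southwest move_southwest_alt
    rw [hPrev0, hPrev1]
    rw [loop_eq r c pl hr0 hr2 hc1 hc4 5 1 nb p0 p1 (by omega) le_rfl hmin1
          ⟨hlen, hrows⟩ hp00' hp03' hp10' hp13' (fun ⟨e1, e2⟩ => hdiag' ⟨e1, by omega⟩)]
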